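-- pv_equiv track=rewrite | github.com/guxinghuahuo/AZXGameAdder | game_helper.py | find_valid_rectangles
-- ===== SOURCE A (Python) =====
-- HEIGHT_MAX_WIDTH = {1: 9, 2: 4, 3: 3}
--
-- def build_prefix_sum(grid):
--     rows = len(grid)
--     cols = len(grid[0])
--     ps = [[0] * (cols + 1) for _ in range(rows + 1)]
--     for i in range(rows):
--         for j in range(cols):
--             v = grid[i][j]
--             val = 0 if v is None else v
--             ps[i + 1][j + 1] = (
--                 ps[i][j + 1] + ps[i + 1][j] - ps[i][j] + val
--             )
--     return ps
--
-- def rect_sum(ps, r1, c1, r2, c2):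
--     return (ps[r2 + 1][c2 + 1]
--             - ps[r1][c2 + 1]
--             - ps[r2 + 1][c1]
--             + ps[r1][c1])
--
-- def find_valid_rectangles(grid):
--     """
--     找出所有符合规则的矩形：
--       - 高度只能是 1、2、3
--       - 对应最大宽度：1→9，2→4，3→3
--       - 矩形内数字和为 10
--       - None 视为 0，可以被框进去
--     返回列表：(r1,c1,r2,c2,area)，按面积从小到大排序。
--     """
--     rows = len(grid)
--     cols = len(grid[0])
--     ps = build_prefix_sum(grid)
--
--     moves = []
--     for top in range(rows):
--         for left in range(cols):
--             for h in (1, 2, 3):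
--                 bottom = top + h - 1
--                 if bottom >= rows:
--                     break
--                 max_w = min(HEIGHT_MAX_WIDTH[h], cols - left)
--                 for w in range(1, max_w + 1):
--                     right = left + w - 1
--                     area = h * w
--                     if area < 2:
--                         continue
--                     s = rect_sum(ps, top, left, bottom, right)
--                     if s == 10:
--                         moves.append((top, left, bottom, right, area))
--
--     moves.sort(key=lambda x: (x[4], x[0], x[1]))
--     return moves
-- ===== SOURCE B (Python) =====
-- HEIGHT_MAX_WIDTH = {1: 9, 2: 4, 3: 3}
--
-- def find_valid_rectangles(grid):
--     """Same search, but sums each candidate rectangle directly (None -> 0)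
--     instead of building a prefix-sum table first."""
--     rows = len(grid)
--     cols = len(grid[0])
--     moves = []
--     for top in range(rows):
--         for left in range(cols):
--             for h in (1, 2, 3):
--                 bottom = top + h - 1
--                 if bottom >= rows:
--                     break
--                 max_w = min(HEIGHT_MAX_WIDTH[h], cols - left)
--                 for w in range(1, max_w + 1):
--                     right = left + w - 1
--                     area = h * w
--                     if area < 2:
--                         continue
--                     s = 0
--                     for i in range(top, bottom + 1):
--                         for j in range(left, right + 1):
--                             v = grid[i][j]
--                             if v is not None:
--                                 s += v
--                     if s == 10:
--                         moves.append((top, left, bottom, right, area))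
--     moves.sort(key=lambda x: (x[4], x[0], x[1]))
--     return moves
-- ===== Notes on version B (the rewrite author's own statement) =====
-- stated objective: simpler
-- what changed: Removed the prefix-sum table (build_prefix_sum/rect_sum) entirely; each candidate rectangle's sum is computed by directly adding its cells (None as 0), keeping the identical enumeration and stable sort order.
import Mathlib
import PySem

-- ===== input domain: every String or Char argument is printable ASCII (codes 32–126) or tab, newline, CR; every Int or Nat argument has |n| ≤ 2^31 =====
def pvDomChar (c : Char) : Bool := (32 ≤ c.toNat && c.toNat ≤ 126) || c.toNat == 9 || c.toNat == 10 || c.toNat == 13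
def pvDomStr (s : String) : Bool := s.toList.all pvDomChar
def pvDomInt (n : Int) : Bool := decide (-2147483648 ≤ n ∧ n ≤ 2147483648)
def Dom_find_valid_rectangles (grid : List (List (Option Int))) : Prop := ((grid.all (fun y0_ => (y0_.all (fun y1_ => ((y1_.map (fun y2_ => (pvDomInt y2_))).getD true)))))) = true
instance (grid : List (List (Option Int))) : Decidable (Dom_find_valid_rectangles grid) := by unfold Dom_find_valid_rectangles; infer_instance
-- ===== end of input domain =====

-- B removes A's prefix-sum table and sums each candidate rectangle's cells directly;
-- the enumeration order and the stable sort are unchanged.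

-- helpers shared by both ports (module-level constant HEIGHT_MAX_WIDTH and the final stable sort)
def pvHMW (h : Nat) : Nat := if h = 1 then 9 else if h = 2 then 4 else 3

-- moves.sort(key=lambda x: (x[4], x[0], x[1])): stable sort = the insertBy fold with the strict
-- lexicographic order on (area, top, left) (exactly PySem.List.sorted's reduction, 3-component key)
def pvLt (a b : Int × Int × Int × Int × Int) : Bool :=
  decide (a.2.2.2.2 < b.2.2.2.2 ∨ (a.2.2.2.2 = b.2.2.2.2 ∧
    (a.1 < b.1 ∨ (a.1 = b.1 ∧ a.2.1 < b.2.1))))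

def pvSortMoves (moves : List (Int × Int × Int × Int × Int)) : List (Int × Int × Int × Int × Int) :=
  moves.foldl (fun acc x => PySem.List.insertBy pvLt x acc) []

-- ===== PORT A =====
-- list indexing is via getD: under Pre_ every Python index below is in range
def build_prefix_sum (grid : List (List (Option Int))) : List (List Int) :=
  let rows := grid.length
  let cols := (grid.headD []).length
  (List.range rows).foldl (fun ps i =>
    (List.range cols).foldl (fun ps j =>
      let v := (grid.getD i []).getD j none
      let val : Int := match v with | none => 0 | some x => x
      ps.set (i+1) ((ps.getD (i+1) []).set (j+1)
        ((ps.getD i []).getD (j+1) 0 + (ps.getD (i+1) []).getD j 0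
          - (ps.getD i []).getD j 0 + val))) ps)
    (List.replicate (rows+1) (List.replicate (cols+1) (0:Int)))

def rect_sum (ps : List (List Int)) (r1 c1 r2 c2 : Nat) : Int :=
  (ps.getD (r2+1) []).getD (c2+1) 0 - (ps.getD r1 []).getD (c2+1) 0
    - (ps.getD (r2+1) []).getD c1 0 + (ps.getD r1 []).getD c1 0

-- the 'for h in (1,2,3)' loop with its break, A's body
def pvHLoopA (ps : List (List Int)) (rows cols top left : Nat) :
    List Nat → List (Int × Int × Int × Int × Int) → List (Int × Int × Int × Int × Int)
  | [], moves => moves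
  | h :: hs, moves =>
    let bottom := top + h - 1
    if rows ≤ bottom then moves   -- break
    else
      let max_w := min (pvHMW h) (cols - left)
      let moves := (List.range' 1 max_w).foldl (fun moves w =>
        let right := left + w - 1
        let area := h * w
        if area < 2 then moves    -- continue
        else
          let s := rect_sum ps top left bottom right
          if s = 10 then
            moves ++ [((top:Int), (left:Int), (bottom:Int), (right:Int), (area:Int))]
          else moves) moves
      pvHLoopA ps rows cols top left hs moves

def find_valid_rectangles (grid : List (List (Option Int))) : List (Int × Int × Int × Int × Int) :=
  let rows := grid.length
  let cols := (grid.headD []).length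
  let ps := build_prefix_sum grid
  let moves := (List.range rows).foldl (fun moves top =>
    (List.range cols).foldl (fun moves left =>
      pvHLoopA ps rows cols top left [1, 2, 3] moves) moves) []
  pvSortMoves moves

-- ===== PORT B =====
-- same enumeration, but s is the direct double sum over the rectangle's cells (None -> 0)
def pvHLoopB (grid : List (List (Option Int))) (rows cols top left : Nat) :
    List Nat → List (Int × Int × Int × Int × Int) → List (Int × Int × Int × Int × Int)
  | [], moves => moves
  | h :: hs, moves =>
    let bottom := top + h - 1
    if rows ≤ bottom then moves   -- break
    else
      let max_w := min (pvHMW h) (cols - left)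
      let moves := (List.range' 1 max_w).foldl (fun moves w =>
        let right := left + w - 1
        let area := h * w
        if area < 2 then moves    -- continue
        else
          let s := (List.range' top (bottom + 1 - top)).foldl (fun s i =>
            (List.range' left (right + 1 - left)).foldl (fun s j =>
              match (grid.getD i []).getD j none with
              | none => s
              | some v => s + v) s) (0:Int)
          if s = 10 then
            moves ++ [((top:Int), (left:Int), (bottom:Int), (right:Int), (area:Int))]
          else moves) moves
      pvHLoopB grid rows cols top left hs moves

def find_valid_rectangles_alt (grid : List (List (Option Int))) : List (Int × Int × Int × Int × Int) :=
  let rows := grid.length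
  let cols := (grid.headD []).length
  let moves := (List.range rows).foldl (fun moves top =>
    (List.range cols).foldl (fun moves left =>
      pvHLoopB grid rows cols top left [1, 2, 3] moves) moves) []
  pvSortMoves moves

-- ===== PRECONDITION & SPEC =====
-- Pre_ excludes exactly the inputs on which the Python A raises IndexError:
-- the empty grid (grid[0]) and ragged grids having a row shorter than row 0 (grid[i][j]).
def Pre_find_valid_rectangles (grid : List (List (Option Int))) : Prop :=
  grid ≠ [] ∧ ∀ r ∈ grid, (grid.headD []).length ≤ r.length
instance (grid : List (List (Option Int))) : Decidable (Pre_find_valid_rectangles grid) := by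
  unfold Pre_find_valid_rectangles; infer_instance

def pvWitness_find_valid_rectangles : List (List (Option Int)) := [[some 10, some 0], [none, some 3]]

def Spec_find_valid_rectangles (grid : List (List (Option Int))) (out : List (Int × Int × Int × Int × Int)) : Prop := out = find_valid_rectangles_alt grid
instance (grid : List (List (Option Int))) (out : List (Int × Int × Int × Int × Int)) : Decidable (Spec_find_valid_rectangles grid out) := by unfold Spec_find_valid_rectangles; infer_instance

-- ===== CLAIM (what is proved, stated in full; the proofs are below) =====
def Claim_equal_find_valid_rectangles : Prop := ∀ (grid : List (List (Option Int))), Dom_find_valid_rectangles grid → Pre_find_valid_rectangles grid → Spec_find_valid_rectangles grid (find_valid_rectangles grid)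

-- ===== LEMMAS AND PROOFS =====

-- the value of a cell, None read as 0 (total via getD; matches both ports' reads)
def pvVal (grid : List (List (Option Int))) (i j : Nat) : Int :=
  ((grid.getD i []).getD j none).getD 0

-- the mathematical prefix sum
def pvP (grid : List (List (Option Int))) (a b : Nat) : Int :=
  ∑ i ∈ Finset.range a, ∑ j ∈ Finset.range b, pvVal grid i j

lemma pvP_zero_left (g : List (List (Option Int))) (b : Nat) : pvP g 0 b = 0 := by
  simp [pvP]

lemma pvP_zero_right (g : List (List (Option Int))) (a : Nat) : pvP g a 0 = 0 := by
  simp [pvP]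

lemma pvP_rec (g : List (List (Option Int))) (i j : Nat) :
    pvP g (i+1) (j+1) = pvP g i (j+1) + pvP g (i+1) j - pvP g i j + pvVal g i j := by
  simp [pvP, Finset.sum_range_succ]; ring


-- entry (a,b) of a prefix-sum matrix, read the way the ports read it
def pvE (ps : List (List Int)) (a b : Nat) : Int := (ps.getD a []).getD b 0

-- the inner-loop body of build_prefix_sum, named so the fold can be reasoned about
def pvInnerF (g : List (List (Option Int))) (i : Nat) (ps : List (List Int)) (j : Nat) : List (List Int) :=
  let v := (g.getD i []).getD j none
  let val : Int := match v with | none => 0 | some x => x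
  ps.set (i+1) ((ps.getD (i+1) []).set (j+1)
    ((ps.getD i []).getD (j+1) 0 + (ps.getD (i+1) []).getD j 0
      - (ps.getD i []).getD j 0 + val))

lemma build_eq (g : List (List (Option Int))) :
    build_prefix_sum g = (List.range g.length).foldl
      (fun ps i => (List.range (g.headD []).length).foldl (pvInnerF g i) ps)
      (List.replicate (g.length+1) (List.replicate ((g.headD []).length+1) (0:Int))) := rfl

lemma pvGetD_set_ne {α : Type} (l : List α) (i j : Nat) (x d : α) (h : i ≠ j) :
    (l.set i x).getD j d = l.getD j d := by
  simp [List.getD_eq_getElem?_getD, List.getElem?_set_ne h]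

lemma pvGetD_set_self {α : Type} (l : List α) (i : Nat) (x d : α) (h : i < l.length) :
    (l.set i x).getD i d = x := by
  simp [List.getD_eq_getElem?_getD, h]

lemma pvGetD_replicate {α : Type} (n i : Nat) (x d : α) :
    (List.replicate n x).getD i d = if i < n then x else d := by
  simp [List.getD_eq_getElem?_getD, List.getElem?_replicate]; split <;> simp

lemma pvVal_match (g : List (List (Option Int))) (i j : Nat) :
    (match (g.getD i []).getD j none with | none => (0:Int) | some x => x) = pvVal g i j := by
  unfold pvVal; cases h : (g.getD i []).getD j none <;> simp only [h] <;> simp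

def pvShape (rows cols : Nat) (ps : List (List Int)) : Prop :=
  ps.length = rows+1 ∧ ∀ a, a ≤ rows → (ps.getD a []).length = cols+1

lemma pvE_innerF_ne (g : List (List (Option Int))) (i : Nat) (ps : List (List Int)) (j a b : Nat)
    (ha : a ≠ i+1) : pvE (pvInnerF g i ps j) a b = pvE ps a b := by
  unfold pvE pvInnerF
  rw [pvGetD_set_ne _ _ _ _ _ (fun h => ha h.symm)]

lemma pvE_innerF_miss (g : List (List (Option Int))) (i : Nat) (ps : List (List Int)) (j b : Nat)
    (hlen : i+1 < ps.length) (hb : b ≠ j+1) :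
    pvE (pvInnerF g i ps j) (i+1) b = pvE ps (i+1) b := by
  unfold pvE pvInnerF
  rw [pvGetD_set_self _ _ _ _ hlen, pvGetD_set_ne _ _ _ _ _ (fun h => hb h.symm)]

lemma pvE_innerF_hit (g : List (List (Option Int))) (i : Nat) (ps : List (List Int)) (j : Nat)
    (hlen : i+1 < ps.length) (hrow : j+1 < (ps.getD (i+1) []).length) :
    pvE (pvInnerF g i ps j) (i+1) (j+1)
      = pvE ps i (j+1) + pvE ps (i+1) j - pvE ps i j + pvVal g i j := by
  unfold pvE pvInnerF
  rw [pvGetD_set_self _ _ _ _ hlen, pvGetD_set_self _ _ _ _ hrow, pvVal_match]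

lemma pvShape_innerF (rows cols : Nat) (g : List (List (Option Int))) (i j : Nat)
    (ps : List (List Int)) (h : pvShape rows cols ps) (hi : i < rows) :
    pvShape rows cols (pvInnerF g i ps j) := by
  obtain ⟨h1, h2⟩ := h
  constructor
  · unfold pvInnerF; simpa using h1
  · intro a ha
    by_cases hai : a = i+1
    · subst hai
      unfold pvInnerF
      rw [pvGetD_set_self _ _ _ _ (by omega)]
      simpa using h2 (i+1) ha
    · unfold pvInnerF
      rw [pvGetD_set_ne _ _ _ _ _ (fun h => hai h.symm)]
      exact h2 a ha

def pvInnerInv (g : List (List (Option Int))) (rows cols i m : Nat) (ps : List (List Int)) : Prop :=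
  pvShape rows cols ps ∧
  (∀ a b, a ≤ i → b ≤ cols → pvE ps a b = pvP g a b) ∧
  (∀ b, b ≤ m → b ≤ cols → pvE ps (i+1) b = pvP g (i+1) b) ∧
  (∀ b, m < b → b ≤ cols → pvE ps (i+1) b = 0) ∧
  (∀ a b, i+1 < a → b ≤ cols → pvE ps a b = 0)

lemma pvInner_step (g : List (List (Option Int))) (rows cols i m : Nat) (ps : List (List Int))
    (hi : i < rows) (hm : m < cols) (H : pvInnerInv g rows cols i m ps) :
    pvInnerInv g rows cols i (m+1) (pvInnerF g i ps m) := by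
  obtain ⟨hsh, h2, h3, h4, h5⟩ := H
  have hlen : i+1 < ps.length := by have := hsh.1; omega
  have hrow : m+1 < (ps.getD (i+1) []).length := by rw [hsh.2 (i+1) (by omega)]; omega
  refine ⟨pvShape_innerF rows cols g i m ps hsh hi, ?_, ?_, ?_, ?_⟩
  · intro a b ha hb
    rw [pvE_innerF_ne _ _ _ _ _ _ (by omega)]; exact h2 a b ha hb
  · intro b hb hbc
    by_cases hbm : b = m+1
    · subst hbm
      rw [pvE_innerF_hit _ _ _ _ hlen hrow,
          h2 i (m+1) le_rfl hbc, h3 m le_rfl (by omega), h2 i m le_rfl (by omega), pvP_rec]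
    · rw [pvE_innerF_miss _ _ _ _ _ hlen hbm]
      exact h3 b (by omega) hbc
  · intro b hb hbc
    rw [pvE_innerF_miss _ _ _ _ _ hlen (by omega)]
    exact h4 b (by omega) hbc
  · intro a b ha hb
    rw [pvE_innerF_ne _ _ _ _ _ _ (by omega)]; exact h5 a b ha hb

lemma pvInner_fold (g : List (List (Option Int))) (rows cols i : Nat) (ps : List (List Int))
    (hi : i < rows) (H : pvInnerInv g rows cols i 0 ps) :
    ∀ m, m ≤ cols → pvInnerInv g rows cols i m ((List.range m).foldl (pvInnerF g i) ps)
  | 0, _ => by simpa using H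
  | m+1, hm => by
    rw [List.range_succ, List.foldl_append]
    exact pvInner_step g rows cols i m _ hi (by omega)
      (pvInner_fold g rows cols i ps hi H m (by omega))

def pvOuterInv (g : List (List (Option Int))) (rows cols k : Nat) (ps : List (List Int)) : Prop :=
  pvShape rows cols ps ∧
  (∀ a b, a ≤ k → b ≤ cols → pvE ps a b = pvP g a b) ∧
  (∀ a b, k < a → b ≤ cols → pvE ps a b = 0)

lemma pvOuter_step (g : List (List (Option Int))) (rows cols k : Nat) (ps : List (List Int))
    (hk : k < rows) (H : pvOuterInv g rows cols k ps) :
    pvOuterInv g rows cols (k+1) ((List.range cols).foldl (pvInnerF g k) ps) := by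
  obtain ⟨hsh, h2, h3⟩ := H
  have Hin : pvInnerInv g rows cols k 0 ps := by
    refine ⟨hsh, h2, ?_, ?_, ?_⟩
    · intro b hb hbc
      have hb0 : b = 0 := by omega
      subst hb0
      rw [h3 (k+1) 0 (by omega) (by omega), pvP_zero_right]
    · intro b hb hbc; exact h3 (k+1) b (by omega) hbc
    · intro a b ha hb; exact h3 a b (by omega) hb
  obtain ⟨hsh', h2', h3', h4', h5'⟩ := pvInner_fold g rows cols k ps hk Hin cols le_rfl
  refine ⟨hsh', ?_, ?_⟩
  · intro a b ha hb
    by_cases hak : a = k+1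
    · subst hak; exact h3' b hb hb
    · exact h2' a b (by omega) hb
  · intro a b ha hb; exact h5' a b ha hb

lemma pvE_ps0 (rows cols a b : Nat) :
    pvE (List.replicate (rows+1) (List.replicate (cols+1) (0:Int))) a b = 0 := by
  unfold pvE
  rw [pvGetD_replicate]
  split
  · rw [pvGetD_replicate]; split <;> rfl
  · rfl

lemma pvOuter_fold (g : List (List (Option Int))) (rows cols : Nat) :
    ∀ k, k ≤ rows → pvOuterInv g rows cols k
      ((List.range k).foldl (fun ps i => (List.range cols).foldl (pvInnerF g i) ps)
        (List.replicate (rows+1) (List.replicate (cols+1) (0:Int))))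
  | 0, _ => by
    simp only [List.range_zero, List.foldl_nil]
    refine ⟨⟨by simp, ?_⟩, ?_, ?_⟩
    · intro a ha
      rw [pvGetD_replicate, if_pos (by omega : a < rows+1)]
      simp
    · intro a b ha hb
      have ha0 : a = 0 := by omega
      subst ha0
      rw [pvE_ps0, pvP_zero_left]
    · intro a b ha hb; exact pvE_ps0 rows cols a b
  | k+1, hk => by
    rw [List.range_succ, List.foldl_append]
    exact pvOuter_step g rows cols k _ (by omega) (pvOuter_fold g rows cols k (by omega))

lemma pvPs_entry (g : List (List (Option Int))) (a b : Nat)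
    (ha : a ≤ g.length) (hb : b ≤ (g.headD []).length) :
    pvE (build_prefix_sum g) a b = pvP g a b := by
  rw [build_eq]
  exact (pvOuter_fold g g.length (g.headD []).length g.length le_rfl).2.1 a b ha hb

lemma pvP_rect (g : List (List (Option Int))) (r1 c1 r2 c2 : Nat)
    (h1 : r1 ≤ r2+1) (h2 : c1 ≤ c2+1) :
    pvP g (r2+1) (c2+1) - pvP g r1 (c2+1) - pvP g (r2+1) c1 + pvP g r1 c1
      = ∑ i ∈ Finset.Ico r1 (r2+1), ∑ j ∈ Finset.Ico c1 (c2+1), pvVal g i j := by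
  have hin : ∀ i, ∑ j ∈ Finset.Ico c1 (c2+1), pvVal g i j
      = (∑ j ∈ Finset.range (c2+1), pvVal g i j) - ∑ j ∈ Finset.range c1, pvVal g i j :=
    fun i => Finset.sum_Ico_eq_sub _ h2
  simp only [hin]
  rw [Finset.sum_sub_distrib, Finset.sum_Ico_eq_sub _ h1, Finset.sum_Ico_eq_sub _ h1]
  unfold pvP; ring

lemma pvRect_sum_eq (g : List (List (Option Int))) (r1 c1 r2 c2 : Nat)
    (h1 : r1 ≤ r2) (h2 : c1 ≤ c2) (hr : r2 < g.length) (hc : c2 < (g.headD []).length) :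
    rect_sum (build_prefix_sum g) r1 c1 r2 c2
      = ∑ i ∈ Finset.Ico r1 (r2+1), ∑ j ∈ Finset.Ico c1 (c2+1), pvVal g i j := by
  have e1 := pvPs_entry g (r2+1) (c2+1) (by omega) (by omega)
  have e2 := pvPs_entry g r1 (c2+1) (by omega) (by omega)
  have e3 := pvPs_entry g (r2+1) c1 (by omega) (by omega)
  have e4 := pvPs_entry g r1 c1 (by omega) (by omega)
  unfold pvE at e1 e2 e3 e4
  unfold rect_sum
  rw [e1, e2, e3, e4]
  exact pvP_rect g r1 c1 r2 c2 (by omega) (by omega)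

lemma pvFoldl_add_range' (f : Nat → Int) :
    ∀ (n a : Nat) (c : Int),
      (List.range' a n).foldl (fun s i => s + f i) c = c + ∑ i ∈ Finset.Ico a (a+n), f i
  | 0, a, c => by simp
  | n+1, a, c => by
    rw [List.range'_succ, List.foldl_cons, pvFoldl_add_range' f n (a+1) (c + f a),
        Finset.sum_eq_sum_Ico_succ_bot (by omega : a < a+(n+1)) f,
        show a+1+n = a+(n+1) from by omega]
    ring

lemma pvSB_eq (g : List (List (Option Int))) (top left bottom right : Nat)
    (h1 : top ≤ bottom) (h2 : left ≤ right) :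
    (List.range' top (bottom+1-top)).foldl (fun s i =>
        (List.range' left (right+1-left)).foldl (fun s j =>
          match (g.getD i []).getD j none with
          | none => s
          | some v => s + v) s) (0:Int)
      = ∑ i ∈ Finset.Ico top (bottom+1), ∑ j ∈ Finset.Ico left (right+1), pvVal g i j := by
  have hmatch : ∀ i : Nat,
      (fun (s:Int) (j:Nat) => match (g.getD i []).getD j none with
        | none => s | some v => s + v) = fun s j => s + pvVal g i j := by
    intro i; funext s j
    unfold pvVal
    cases h : (g.getD i []).getD j none <;> simp
  simp only [hmatch]
  have hinner : ∀ (i : Nat) (s : Int),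
      (List.range' left (right+1-left)).foldl (fun s j => s + pvVal g i j) s
        = s + ∑ j ∈ Finset.Ico left (right+1), pvVal g i j := by
    intro i s
    rw [pvFoldl_add_range', show left + (right+1-left) = right+1 from by omega]
  simp only [hinner]
  rw [pvFoldl_add_range', show top + (bottom+1-top) = bottom+1 from by omega]
  simp

lemma pvHLoop_eq (g : List (List (Option Int))) (top left : Nat)
    (htop : top < g.length) (hleft : left < (g.headD []).length) :
    ∀ (hs : List Nat), (∀ h ∈ hs, 1 ≤ h) → ∀ moves,
      pvHLoopA (build_prefix_sum g) g.length (g.headD []).length top left hs moves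
        = pvHLoopB g g.length (g.headD []).length top left hs moves
  | [], _, moves => rfl
  | h :: hs, hall, moves => by
    have h1 : 1 ≤ h := hall h (by simp)
    simp only [pvHLoopA, pvHLoopB]
    by_cases hb : g.length ≤ top + h - 1
    · simp [hb]
    · simp only [if_neg hb]
      have hfold : ((List.range' 1 (min (pvHMW h) ((g.headD []).length - left))).foldl
            (fun moves w =>
              let right := left + w - 1
              let area := h * w
              if area < 2 then moves
              else
                let s := rect_sum (build_prefix_sum g) top left (top + h - 1) right
                if s = 10 then
                  moves ++ [((top:Int), (left:Int), ((top + h - 1 : Nat):Int), (right:Int), (area:Int))]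
                else moves) moves)
          = ((List.range' 1 (min (pvHMW h) ((g.headD []).length - left))).foldl
            (fun moves w =>
              let right := left + w - 1
              let area := h * w
              if area < 2 then moves
              else
                let s := (List.range' top ((top + h - 1) + 1 - top)).foldl (fun s i =>
                  (List.range' left (right + 1 - left)).foldl (fun s j =>
                    match (g.getD i []).getD j none with
                    | none => s
                    | some v => s + v) s) (0:Int)
                if s = 10 then
                  moves ++ [((top:Int), (left:Int), ((top + h - 1 : Nat):Int), (right:Int), (area:Int))]
                else moves) moves) := by
        apply PySem.List.foldl_congr_mem
        intro acc w hw
        rw [List.mem_range'_1] at hw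
        obtain ⟨hw1, hw2⟩ := hw
        have hmin := Nat.min_le_right (pvHMW h) ((g.headD []).length - left)
        by_cases harea : h * w < 2
        · simp [harea]
        · simp only [if_neg harea]
          have hsum : rect_sum (build_prefix_sum g) top left (top + h - 1) (left + w - 1)
              = (List.range' top ((top + h - 1) + 1 - top)).foldl (fun s i =>
                  (List.range' left ((left + w - 1) + 1 - left)).foldl (fun s j =>
                    match (g.getD i []).getD j none with
                    | none => s
                    | some v => s + v) s) (0:Int) := by
            rw [pvRect_sum_eq g top left (top + h - 1) (left + w - 1)
                  (by omega) (by omega) (by omega) (by omega),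
                pvSB_eq g top left (top + h - 1) (left + w - 1) (by omega) (by omega)]
          rw [hsum]
      rw [hfold]
      exact pvHLoop_eq g top left htop hleft hs
        (fun x hx => hall x (List.mem_cons_of_mem _ hx)) _

theorem find_valid_rectangles_spec : Claim_equal_find_valid_rectangles := by
  intro grid _ _
  unfold Spec_find_valid_rectangles find_valid_rectangles find_valid_rectangles_alt
  refine congrArg pvSortMoves ?_
  apply PySem.List.foldl_congr_mem
  intro acc top htop
  apply PySem.List.foldl_congr_mem
  intro acc2 left hleft
  rw [List.mem_range] at htop hleft
  refine pvHLoop_eq grid top left htop hleft [1, 2, 3] ?_ acc2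
  intro x hx
  simp at hx
  rcases hx with rfl | rfl | rfl <;> omega
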